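-- pv_equiv track=rewrite | github.com/OpenBlatam/IA-Models-Clone | ai_history_comparison/content_optimization_engine.py | _optimize_structure
-- ===== SOURCE A (Python) =====
-- def _optimize_structure(content: str) -> str:
--     """Optimize content structure"""
--     # Add headings and improve structure (simplified)
--     paragraphs = content.split('\n\n')
--     optimized_paragraphs = []
--
--     for i, paragraph in enumerate(paragraphs):
--         if i == 0 and not paragraph.startswith('#'):
--             optimized_paragraphs.append(f"# {paragraph}")
--         else:
--             optimized_paragraphs.append(paragraph)
--
--     return '\n\n'.join(optimized_paragraphs)
-- ===== SOURCE B (Python) =====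
-- def _optimize_structure(content: str) -> str:
--     """Optimize content structure"""
--     # Only the first paragraph is ever touched, and it starts where the
--     # content starts, so no split/rejoin is needed.
--     if content.startswith('#'):
--         return content
--     return '# ' + content
-- ===== Notes on version B (the rewrite author's own statement) =====
-- stated objective: simpler
-- what changed: Replaces the paragraph split, enumerate loop and rejoin with a single startswith guard that prepends the heading marker to the whole content, using that joining undoes the split and only the first paragraph (the content's own prefix) is ever modified.
import Mathlib
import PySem

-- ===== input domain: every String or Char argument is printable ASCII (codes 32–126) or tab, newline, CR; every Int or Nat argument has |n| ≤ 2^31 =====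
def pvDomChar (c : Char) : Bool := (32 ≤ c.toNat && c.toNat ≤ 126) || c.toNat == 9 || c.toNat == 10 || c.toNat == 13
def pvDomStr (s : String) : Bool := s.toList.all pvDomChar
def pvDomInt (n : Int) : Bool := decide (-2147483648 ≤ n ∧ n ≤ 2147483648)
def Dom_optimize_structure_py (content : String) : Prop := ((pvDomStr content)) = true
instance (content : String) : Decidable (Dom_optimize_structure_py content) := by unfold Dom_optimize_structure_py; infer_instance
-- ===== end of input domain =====

-- B replaces A's split / enumerate-loop / rejoin by a single startswith guard: the objective is 'simpler'.

-- ===== PORT A =====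
def optimize_structure_py (content : String) : String :=
  let paragraphs := PySem.Chars.splitOn content.toList ['\n', '\n']
  let optimized_paragraphs := (PySem.List.enumerate paragraphs 0).foldl
    (fun acc ip =>
      if ip.1 == 0 && !(PySem.Chars.startswith ip.2 ['#']) then acc ++ [['#', ' '] ++ ip.2]
      else acc ++ [ip.2]) []
  String.ofList (PySem.Chars.join ['\n', '\n'] optimized_paragraphs)

-- ===== PORT B =====
def optimize_structure_py_alt (content : String) : String :=
  if PySem.Chars.startswith content.toList ['#'] then content
  else String.ofList ('#' :: ' ' :: content.toList)

-- ===== PRECONDITION & SPEC =====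
def Spec_optimize_structure_py (content : String) (out : String) : Prop := out = optimize_structure_py_alt content
instance (content : String) (out : String) : Decidable (Spec_optimize_structure_py content out) := by unfold Spec_optimize_structure_py; infer_instance

-- ===== CLAIM (what is proved, stated in full; the proofs are below) =====
def Claim_equal_optimize_structure_py : Prop := ∀ (content : String), Dom_optimize_structure_py content → Spec_optimize_structure_py content (optimize_structure_py content)

-- ===== LEMMAS AND PROOFS =====

-- intercalate over a snoc
theorem pv_intercalate_append_singleton (sep y : List Char) (xs : List (List Char)) :
    sep.intercalate (xs ++ [y]) = (if xs = [] then [] else sep.intercalate xs ++ sep) ++ y := by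
  induction xs with
  | nil => simp [List.intercalate]
  | cons a xs ih =>
    cases xs with
    | nil => simp [List.intercalate, List.intersperse]
    | cons b l =>
      have h1 : sep.intercalate ((a :: b :: l) ++ [y]) = a ++ sep ++ sep.intercalate ((b :: l) ++ [y]) := by
        simp [List.intercalate, List.intersperse]
      have h2 : sep.intercalate (a :: b :: l) = a ++ sep ++ sep.intercalate (b :: l) := by
        simp [List.intercalate, List.intersperse]
      simp only [List.cons_append] at h1 ih ⊢
      rw [h1, ih, h2]
      simp

-- the join of splitOn.go, over any state
theorem pv_join_go (sep : List Char) (fuel : Nat) (l cur : List Char) (acc : List (List Char)) :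
    sep.intercalate (PySem.Chars.splitOn.go sep fuel l cur acc)
      = sep.intercalate acc.reverse ++ (if acc = [] then [] else sep) ++ cur.reverse ++ l := by
  induction fuel generalizing l cur acc with
  | zero =>
    simp only [PySem.Chars.splitOn.go]
    rw [show ((cur.reverse ++ l) :: acc).reverse = acc.reverse ++ [cur.reverse ++ l] by simp,
        pv_intercalate_append_singleton]
    cases acc <;> simp [List.intercalate]
  | succ fuel ih =>
    cases l with
    | nil =>
      simp only [PySem.Chars.splitOn.go]
      rw [show (cur.reverse :: acc).reverse = acc.reverse ++ [cur.reverse] by simp,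
          pv_intercalate_append_singleton]
      cases acc <;> simp [List.intercalate]
    | cons c rest =>
      simp only [PySem.Chars.splitOn.go]
      by_cases hp : sep.isPrefixOf (c :: rest) = true
      · rw [if_pos hp, ih]
        obtain ⟨t, ht⟩ := List.isPrefixOf_iff_prefix.mp hp
        rw [show (cur.reverse :: acc).reverse = acc.reverse ++ [cur.reverse] by simp,
            pv_intercalate_append_singleton]
        have hdrop : List.drop sep.length (c :: rest) = t := by
          rw [← ht]; simp
        rw [hdrop]
        cases acc <;> simp [List.intercalate, ← ht]
      · rw [if_neg hp, ih]
        simp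

-- splitOn.go only appends after acc.reverse
theorem pv_go_acc (sep : List Char) (fuel : Nat) (l cur : List Char) (acc : List (List Char)) :
    ∃ r, PySem.Chars.splitOn.go sep fuel l cur acc = acc.reverse ++ r := by
  induction fuel generalizing l cur acc with
  | zero => exact ⟨[cur.reverse ++ l], by simp [PySem.Chars.splitOn.go]⟩
  | succ fuel ih =>
    cases l with
    | nil => exact ⟨[cur.reverse], by simp [PySem.Chars.splitOn.go]⟩
    | cons c rest =>
      simp only [PySem.Chars.splitOn.go]
      by_cases hp : sep.isPrefixOf (c :: rest) = true
      · rw [if_pos hp]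
        obtain ⟨r, hr⟩ := ih (List.drop sep.length (c :: rest)) [] (cur.reverse :: acc)
        exact ⟨cur.reverse :: r, by simp [hr]⟩
      · rw [if_neg hp]; exact ih rest (c :: cur) acc

-- the head of splitOn.go with empty acc
theorem pv_go_head (sep : List Char) (fuel : Nat) (l cur : List Char) :
    ∃ h rest, PySem.Chars.splitOn.go sep fuel l cur [] = h :: rest ∧
      cur.reverse <+: h ∧ h <+: cur.reverse ++ l ∧ (h = cur.reverse → l = [] ∨ sep <+: l) := by
  induction fuel generalizing l cur with
  | zero =>
    refine ⟨cur.reverse ++ l, [], by simp [PySem.Chars.splitOn.go], List.prefix_append _ _,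
      List.prefix_refl _, fun h => Or.inl ?_⟩
    have := congrArg List.length h
    simp at this; exact this
  | succ fuel ih =>
    cases l with
    | nil =>
      exact ⟨cur.reverse, [], by simp [PySem.Chars.splitOn.go], List.prefix_refl _,
        by simp, fun _ => Or.inl rfl⟩
    | cons c rest =>
      by_cases hp : sep.isPrefixOf (c :: rest) = true
      · obtain ⟨r, hr⟩ := pv_go_acc sep fuel (List.drop sep.length (c :: rest)) [] [cur.reverse]
        refine ⟨cur.reverse, r, ?_, List.prefix_refl _, List.prefix_append _ _,
          fun _ => Or.inr (List.isPrefixOf_iff_prefix.mp hp)⟩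
        simp only [PySem.Chars.splitOn.go, if_pos hp]
        simpa using hr
      · obtain ⟨h, r, hgo, h1, h2, _⟩ := ih rest (c :: cur)
        refine ⟨h, r, ?_, ?_, ?_, ?_⟩
        · simp only [PySem.Chars.splitOn.go, if_neg hp]; exact hgo
        · exact ((List.prefix_append cur.reverse [c]).trans (by simpa using h1))
        · simpa using h2
        · intro he
          exfalso
          have := h1.length_le
          simp [he] at this

-- the foldl of A's loop is a map over the enumeration
theorem pv_fold_eq_map (ps : List (List Char)) (s : Int) :
    (PySem.List.enumerate ps s).foldl
      (fun acc ip =>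
        if ip.1 == 0 && !(PySem.Chars.startswith ip.2 ['#']) then acc ++ [['#', ' '] ++ ip.2]
        else acc ++ [ip.2]) []
    = (PySem.List.enumerate ps s).map
        (fun ip => if ip.1 == 0 && !(PySem.Chars.startswith ip.2 ['#']) then ['#', ' '] ++ ip.2 else ip.2) := by
  have hf : (fun (acc : List (List Char)) (ip : Int × List Char) =>
      if ip.1 == 0 && !(PySem.Chars.startswith ip.2 ['#']) then acc ++ [['#', ' '] ++ ip.2]
      else acc ++ [ip.2])
    = fun acc ip => acc ++ [if ip.1 == 0 && !(PySem.Chars.startswith ip.2 ['#']) then ['#', ' '] ++ ip.2 else ip.2] := by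
    funext acc ip; split <;> rfl
  rw [hf, PySem.List.foldl_append_singleton_eq_map]
  simp

-- indices other than 0 are untouched
theorem pv_map_tail (ps : List (List Char)) :
    (PySem.List.enumerate ps 1).map
      (fun ip => if ip.1 == 0 && !(PySem.Chars.startswith ip.2 ['#']) then ['#', ' '] ++ ip.2 else ip.2)
    = ps := by
  have : ∀ ip ∈ PySem.List.enumerate ps 1,
      (if ip.1 == 0 && !(PySem.Chars.startswith ip.2 ['#']) then ['#', ' '] ++ ip.2 else ip.2) = ip.2 := by
    intro ip hip
    obtain ⟨k, hk, rfl⟩ := (PySem.List.mem_enumerate_iff ps 1 ip).mp hip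
    have : (1 : Int) + k ≠ 0 := by omega
    simp [this]
  rw [List.map_congr_left this]
  exact PySem.List.map_snd_enumerate ps 1

-- startswith '#' transfers between content and the first split piece
theorem pv_head_startswith (cs h : List Char) (hpre : h <+: cs)
    (hnil : h = [] → cs = [] ∨ ['\n', '\n'] <+: cs) :
    PySem.Chars.startswith h ['#'] = PySem.Chars.startswith cs ['#'] := by
  cases h with
  | nil =>
    rcases hnil rfl with rfl | ⟨t, ht⟩
    · rfl
    · subst ht; rfl
  | cons c t =>
    obtain ⟨u, hu⟩ := hpre
    subst hu
    simp [PySem.Chars.startswith, List.isPrefixOf]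

-- ===== VERDICT (by name: the statement is the Claim_ definition above) =====
theorem optimize_structure_py_spec : Claim_equal_optimize_structure_py := by
  intro content _
  unfold Spec_optimize_structure_py optimize_structure_py optimize_structure_py_alt
  set cs := content.toList with hcs
  obtain ⟨h, rest, hgo, h1, h2, h3⟩ := pv_go_head ['\n', '\n'] (cs.length + 1) cs []
  have hsplit : PySem.Chars.splitOn cs ['\n', '\n'] = h :: rest := by
    simpa [PySem.Chars.splitOn] using hgo
  simp only [hsplit, pv_fold_eq_map]
  rw [PySem.List.enumerate_cons, List.map_cons, show (0:Int)+1 = 1 from rfl, pv_map_tail]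
  have hjoin : ('\n' :: ['\n']).intercalate (h :: rest) = cs := by
    have := pv_join_go ['\n', '\n'] (cs.length + 1) cs [] []
    rw [hgo] at this
    simpa using this
  have hsw : PySem.Chars.startswith h ['#'] = PySem.Chars.startswith cs ['#'] := by
    apply pv_head_startswith
    · simpa using h2
    · intro he; exact h3 (by simp [he])
  by_cases hst : PySem.Chars.startswith cs ['#'] = true
  · simp only [hst, hsw, PySem.Chars.join]
    rw [if_neg (by decide), hjoin, hcs, String.ofList_toList]
    simp
  · have hst' : PySem.Chars.startswith cs ['#'] = false := by
      simpa using hst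
    simp only [hst', hsw, PySem.Chars.join]
    rw [if_pos (by decide), if_neg (by simp)]
    have : ('\n' :: ['\n']).intercalate ((['#', ' '] ++ h) :: rest) = '#' :: ' ' :: cs := by
      cases rest with
      | nil =>
        have := hjoin; simp [List.intercalate] at this ⊢
        simp [this]
      | cons b l =>
        have e1 : ('\n' :: ['\n']).intercalate ((['#', ' '] ++ h) :: b :: l)
            = (['#', ' '] ++ h) ++ ['\n', '\n'] ++ ('\n' :: ['\n']).intercalate (b :: l) := by
          simp [List.intercalate, List.intersperse]
        have e2 : ('\n' :: ['\n']).intercalate (h :: b :: l)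
            = h ++ ['\n', '\n'] ++ ('\n' :: ['\n']).intercalate (b :: l) := by
          simp [List.intercalate, List.intersperse]
        rw [e1]
        rw [e2] at hjoin
        simp [← hjoin]
    rw [this]
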